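-- pv_equiv track=rewrite | github.com/bio-naeem/RichClawSynth | step1_skeleton_sampler.py | compatible
-- ===== SOURCE A (Python) =====
-- def compatible(candidate: str, chosen: list[str], groups: dict[str, dict[str, list[str]]]) -> bool:
--     for slug in chosen:
--         bucket = groups.get(slug, {})
--         substitutes = set(bucket.get("substitute", []))
--         anti_patterns = set(bucket.get("anti_pattern", []))
--         if candidate in substitutes or candidate in anti_patterns:
--             return False
--     return True
-- ===== SOURCE B (Python) =====
-- def compatible(candidate: str, chosen: list[str], groups: dict[str, dict[str, list[str]]]) -> bool:
--     # Invert the traversal: scan the groups table once to collect the slugs that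
--     # blacklist this candidate, then test disjointness against chosen.
--     blockers = {slug for slug, bucket in groups.items()
--                 if candidate in bucket.get("substitute", [])
--                 or candidate in bucket.get("anti_pattern", [])}
--     return blockers.isdisjoint(chosen)
-- ===== Notes on version B (the rewrite author's own statement) =====
-- stated objective: alternative
-- what changed: A loops over chosen, looks each slug up in groups and early-returns on a hit; B inverts the traversal: it scans the groups table once, comprehends the set of slugs whose substitute/anti_pattern lists contain the candidate, and returns whether that set is disjoint from chosen. Pre_ excludes only association lists with duplicate slug keys, which encode no Python dict (there A's first-match lookup and B's per-entry scan could diverge).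
import Mathlib
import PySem

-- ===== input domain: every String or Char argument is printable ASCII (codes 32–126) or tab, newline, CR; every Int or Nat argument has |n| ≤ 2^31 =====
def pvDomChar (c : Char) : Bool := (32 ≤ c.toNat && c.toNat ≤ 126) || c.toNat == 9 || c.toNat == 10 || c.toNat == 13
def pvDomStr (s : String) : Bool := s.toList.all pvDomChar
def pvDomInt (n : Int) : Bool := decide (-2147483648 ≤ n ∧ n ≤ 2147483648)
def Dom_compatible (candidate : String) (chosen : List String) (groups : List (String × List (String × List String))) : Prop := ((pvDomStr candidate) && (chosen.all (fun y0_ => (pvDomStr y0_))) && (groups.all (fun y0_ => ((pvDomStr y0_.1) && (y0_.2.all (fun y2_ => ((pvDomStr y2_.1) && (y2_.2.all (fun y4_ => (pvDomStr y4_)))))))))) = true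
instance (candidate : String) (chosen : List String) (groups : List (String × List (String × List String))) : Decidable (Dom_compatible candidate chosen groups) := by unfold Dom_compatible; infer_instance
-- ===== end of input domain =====

-- B inverts the traversal: one scan over the groups table collects the slugs that blacklist the
-- candidate, then a single disjointness test against chosen; same results, no speed claim.
-- ===== PORT A =====
-- for slug in chosen: look the slug up, build the two sets, early-return False on a hit
def compatibleGo (candidate : String) (groups : List (String × List (String × List String))) : List String → Bool
  | [] => true
  | slug :: rest =>
    let bucket := (PySem.Dict.mk groups).getD slug []
    let substitutes : PySem.Set String := PySem.Set.ofList ((PySem.Dict.mk bucket).getD "substitute" [])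
    let anti_patterns : PySem.Set String := PySem.Set.ofList ((PySem.Dict.mk bucket).getD "anti_pattern" [])
    if PySem.Set.contains substitutes candidate || PySem.Set.contains anti_patterns candidate then
      false
    else
      compatibleGo candidate groups rest

def compatible (candidate : String) (chosen : List String) (groups : List (String × List (String × List String))) : Bool :=
  compatibleGo candidate groups chosen

-- ===== PORT B =====
-- set comprehension over groups.items(), then blockers.isdisjoint(chosen)
def compatible_alt (candidate : String) (chosen : List String) (groups : List (String × List (String × List String))) : Bool :=
  let blockers : PySem.Set String :=
    PySem.Set.ofList ((groups.filter (fun p =>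
      decide (candidate ∈ (PySem.Dict.mk p.2).getD "substitute" []) ||
      decide (candidate ∈ (PySem.Dict.mk p.2).getD "anti_pattern" []))).map Prod.fst)
  PySem.Set.isdisjoint blockers chosen

-- ===== PRECONDITION & SPEC =====
-- Pre_ excludes only groups lists with duplicate slug keys: those encode no Python dict, and
-- A's first-match lookup there is an artefact of the association-list encoding.
def Pre_compatible (candidate : String) (chosen : List String) (groups : List (String × List (String × List String))) : Prop :=
  (groups.map Prod.fst).Nodup
instance (candidate : String) (chosen : List String) (groups : List (String × List (String × List String))) : Decidable (Pre_compatible candidate chosen groups) := by unfold Pre_compatible; infer_instance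

def pvWitness_compatible : String × List String × (List (String × List (String × List String))) :=
  ("x", ["a", "b"], [("a", [("substitute", ["y"]), ("anti_pattern", ["z"])])])

def Spec_compatible (candidate : String) (chosen : List String) (groups : List (String × List (String × List String))) (out : Bool) : Prop := out = compatible_alt candidate chosen groups
instance (candidate : String) (chosen : List String) (groups : List (String × List (String × List String))) (out : Bool) : Decidable (Spec_compatible candidate chosen groups out) := by unfold Spec_compatible; infer_instance

-- ===== CLAIM (what is proved, stated in full; the proofs are below) =====
def Claim_equal_compatible : Prop := ∀ (candidate : String) (chosen : List String) (groups : List (String × List (String × List String))), Dom_compatible candidate chosen groups → Pre_compatible candidate chosen groups → Spec_compatible candidate chosen groups (compatible candidate chosen groups)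

-- ===== LEMMAS AND PROOFS =====

-- the per-slug blocking test, phrased on the looked-up bucket
def blocksAtB (candidate : String) (groups : List (String × List (String × List String))) (slug : String) : Bool :=
  decide (candidate ∈ (PySem.Dict.mk ((PySem.Dict.mk groups).getD slug [])).getD "substitute" []) ||
  decide (candidate ∈ (PySem.Dict.mk ((PySem.Dict.mk groups).getD slug [])).getD "anti_pattern" [])

theorem compatibleGo_eq (candidate : String) (groups : List (String × List (String × List String)))
    (l : List String) :
    compatibleGo candidate groups l = ! l.any (blocksAtB candidate groups) := by
  induction l with
  | nil => simp [compatibleGo]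
  | cons slug rest ih =>
    simp only [compatibleGo, ih, List.any_cons]
    by_cases h : blocksAtB candidate groups slug
    · rw [if_pos, h]
      · simp
      · unfold blocksAtB at h
        rcases Bool.or_eq_true _ _ ▸ h with h | h <;>
          simp [PySem.Set.contains_eq_listContains, List.contains_eq_mem, PySem.Set.mem_ofList,
            decide_eq_true_iff.mp h]
    · rw [if_neg, Bool.eq_false_iff.mpr h]
      · simp
      · unfold blocksAtB at h
        rw [Bool.or_eq_true, decide_eq_true_iff, decide_eq_true_iff] at h
        push Not at h
        simp [PySem.Set.contains_eq_listContains, List.contains_eq_mem, PySem.Set.mem_ofList,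
          h.1, h.2]

-- with Nodup keys, blocking via the lookup is the same as blocking via some table entry
theorem blocksAtB_iff_entry (candidate : String) (groups : List (String × List (String × List String)))
    (hnd : (groups.map Prod.fst).Nodup) (slug : String) :
    blocksAtB candidate groups slug = true ↔
      ∃ p ∈ groups, p.1 = slug ∧
        (candidate ∈ (PySem.Dict.mk p.2).getD "substitute" [] ∨
         candidate ∈ (PySem.Dict.mk p.2).getD "anti_pattern" []) := by
  have hkeys : (PySem.Dict.mk groups).keys.Nodup := by
    simpa [PySem.Dict.keys_mk] using hnd
  unfold blocksAtB
  rw [Bool.or_eq_true, decide_eq_true_iff, decide_eq_true_iff]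
  constructor
  · intro h
    cases hq : (PySem.Dict.mk groups).get? slug with
    | none =>
      exfalso
      rw [PySem.Dict.getD_of_get?_eq_none _ _ hq] at h
      · rcases h with h | h <;> simp [PySem.Dict.getD, PySem.Dict.get?] at h
    | some b =>
      have hmem : (slug, b) ∈ (PySem.Dict.mk groups).items := PySem.Dict.mem_items_of_get?_eq_some _ hq
      refine ⟨(slug, b), by simpa [PySem.Dict.items] using hmem, rfl, ?_⟩
      rw [PySem.Dict.getD_of_get?_eq_some _ _ hq] at h
      simpa using h
  · rintro ⟨⟨s, b⟩, hp, rfl, hb⟩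
    have : (PySem.Dict.mk groups).getD s [] = b :=
      PySem.Dict.getD_of_mem_items _ (by simpa [PySem.Dict.items] using hp) hkeys []
    rw [this]
    exact hb

-- ===== VERDICT =====
theorem compatible_spec : Claim_equal_compatible := by
  intro candidate chosen groups _ hpre
  unfold Spec_compatible compatible compatible_alt
  rw [compatibleGo_eq]
  by_cases h : ∃ slug ∈ chosen, blocksAtB candidate groups slug = true
  · rcases h with ⟨slug, hsl, hb⟩
    rcases (blocksAtB_iff_entry candidate groups hpre slug).mp hb with ⟨p, hp, hps, hpb⟩
    have hblk : slug ∈ (groups.filter (fun p =>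
        decide (candidate ∈ (PySem.Dict.mk p.2).getD "substitute" []) ||
        decide (candidate ∈ (PySem.Dict.mk p.2).getD "anti_pattern" []))).map Prod.fst := by
      refine List.mem_map.mpr ⟨p, List.mem_filter.mpr ⟨hp, ?_⟩, hps⟩
      simpa [Bool.or_eq_true, decide_eq_true_iff] using hpb
    have hdis : ¬ (PySem.Set.isdisjoint (PySem.Set.ofList ((groups.filter (fun p =>
        decide (candidate ∈ (PySem.Dict.mk p.2).getD "substitute" []) ||
        decide (candidate ∈ (PySem.Dict.mk p.2).getD "anti_pattern" []))).map Prod.fst)) chosen = true) := by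
      rw [PySem.Set.isdisjoint_iff]
      push Not
      exact ⟨slug, (PySem.Set.mem_ofList _ _).mpr hblk, hsl⟩
    rw [List.any_eq_true.mpr ⟨slug, hsl, hb⟩, Bool.eq_false_iff.mpr hdis]
    rfl
  · rw [List.any_eq_false.mpr (by intro x hx; exact (fun hc => h ⟨x, hx, hc⟩))]
    have hdis : PySem.Set.isdisjoint (PySem.Set.ofList ((groups.filter (fun p =>
        decide (candidate ∈ (PySem.Dict.mk p.2).getD "substitute" []) ||
        decide (candidate ∈ (PySem.Dict.mk p.2).getD "anti_pattern" []))).map Prod.fst)) chosen = true := by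
      rw [PySem.Set.isdisjoint_iff]
      intro x hx hxc
      rcases List.mem_map.mp ((PySem.Set.mem_ofList _ _).mp hx) with ⟨p, hpf, hps⟩
      rcases List.mem_filter.mp hpf with ⟨hp, hpb⟩
      refine h ⟨x, hxc, ?_⟩
      rw [blocksAtB_iff_entry candidate groups hpre]
      refine ⟨p, hp, hps, ?_⟩
      simpa [Bool.or_eq_true, decide_eq_true_iff] using hpb
    rw [hdis]
    rfl
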